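-- pv_equiv track=rewrite | github.com/yoo-chris/Python-programmers | Lv1/폰켓몬.py | solution
-- ===== SOURCE A (Python) =====
-- def solution(nums):
--     answer = 0
--     n = []
--     nums.sort()
--     n.append(nums[0])
--
--     for i in range(1,len(nums)):
--         if nums[i] in nums[0:i]:
--             continue
--         else:
--             n.append(nums[i])
--
--     if len(n) >= len(nums) // 2:
--         answer = len(nums) // 2
--     else:
--         answer = len(n)
--     return answer
-- ===== SOURCE B (Python) =====
-- def solution(nums):
--     nums.sort()
--     prev = nums[0]
--     distinct = 1
--     for x in nums[1:]:
--         if x != prev: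
--             distinct += 1
--             prev = x
--     return min(distinct, len(nums) // 2)
-- ===== Notes on version B (the rewrite author's own statement) =====
-- stated objective: faster
-- what changed: Replaces A's quadratic seen-so-far membership scan over the prefix nums[0:i] with a single linear pass that counts changes between adjacent elements of the sorted list, then returns min(distinct, len(nums)//2).
import Mathlib
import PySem

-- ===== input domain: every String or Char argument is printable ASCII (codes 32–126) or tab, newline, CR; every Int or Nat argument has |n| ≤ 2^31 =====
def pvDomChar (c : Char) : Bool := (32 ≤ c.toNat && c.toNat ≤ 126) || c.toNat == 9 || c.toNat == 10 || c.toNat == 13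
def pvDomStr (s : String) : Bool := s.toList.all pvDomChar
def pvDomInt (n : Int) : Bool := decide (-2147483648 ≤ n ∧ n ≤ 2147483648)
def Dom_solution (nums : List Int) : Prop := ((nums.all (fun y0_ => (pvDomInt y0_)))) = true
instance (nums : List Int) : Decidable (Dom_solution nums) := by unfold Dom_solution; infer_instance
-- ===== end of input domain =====

-- B replaces A's quadratic membership scan over the already-scanned prefix with one linear pass counting
-- changes between adjacent elements of the sorted list (objective: faster). Both A and B sort nums
-- in place (nums.sort()); the equivalence proved here is about the return value.

-- ===== PORT A =====
def solution (nums : List Int) : Int :=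
  let s := PySem.List.sorted nums (fun x => x)
  let n0 : List Int := [PySem.List.pyGetD s 0 0]   -- first element of nums; IndexError on empty input, excluded by Pre_
  let n := (PySem.List.pyRange 1 (s.length : Int)).foldl
      (fun n i =>
        if PySem.List.pyGetD s i 0 ∈ PySem.List.slice s (some 0) (some i) then n
        else n ++ [PySem.List.pyGetD s i 0]) n0
  if (n.length : Int) ≥ PySem.Int.floordiv (s.length : Int) 2 then
    PySem.Int.floordiv (s.length : Int) 2
  else (n.length : Int)

-- ===== PORT B =====
def solution_alt (nums : List Int) : Int :=
  let s := PySem.List.sorted nums (fun x => x)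
  let prev0 := PySem.List.pyGetD s 0 0             -- first element of nums; IndexError on empty input, excluded by Pre_
  let st := (PySem.List.slice s (some 1) none).foldl
      (fun (st : Int × Int) x => if x ≠ st.2 then (st.1 + 1, x) else st) (1, prev0)
  min st.1 (PySem.Int.floordiv (s.length : Int) 2)

-- ===== PRECONDITION & SPEC =====
-- Pre_ excludes only the empty list, on which both A and B raise IndexError reading the first element.
def Pre_solution (nums : List Int) : Prop := nums ≠ []
instance (nums : List Int) : Decidable (Pre_solution nums) := by unfold Pre_solution; infer_instance
def pvWitness_solution : List Int := [3, 1, 2, 3]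

def Spec_solution (nums : List Int) (out : Int) : Prop := out = solution_alt nums
instance (nums : List Int) (out : Int) : Decidable (Spec_solution nums out) := by unfold Spec_solution; infer_instance

-- ===== CLAIM (what is proved, stated in full; the proofs are below) =====
def Claim_equal_solution : Prop := ∀ (nums : List Int), Dom_solution nums → Pre_solution nums → Spec_solution nums (solution nums)

-- ===== LEMMAS AND PROOFS =====

-- appending one element to the argument of PySem's ordered dedup
lemma dedup_append_singleton (l : List Int) (a : Int) :
    PySem.List.dedup (l ++ [a])
      = if a ∈ l then PySem.List.dedup l else PySem.List.dedup l ++ [a] := by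
  rw [PySem.List.dedup_eq_ofList, PySem.Set.ofList_eq_foldl, List.foldl_append,
    ← PySem.Set.ofList_eq_foldl, ← PySem.List.dedup_eq_ofList]
  show PySem.Set.add (PySem.List.dedup l) a = _
  by_cases h : a ∈ l
  · simp [PySem.Set.add, PySem.Set.contains, h]
  · simp [PySem.Set.add, PySem.Set.contains, h]

-- the distinct elements of a list, counted: length of the ordered dedup = card of the value set
lemma dedup_length (s : List Int) : (PySem.List.dedup s).length = s.toFinset.card := by
  rw [← List.toFinset_card_of_nodup (PySem.List.nodup_dedup s)]
  congr 1
  ext x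
  simp

-- A's loop over range(1, k) builds exactly the ordered dedup of the first k elements
lemma loopA (s : List Int) (k : Nat) (h1 : 1 ≤ k) (hk : k ≤ s.length) :
    (PySem.List.pyRange 1 (k : Int)).foldl
      (fun n i =>
        if PySem.List.pyGetD s i 0 ∈ PySem.List.slice s (some 0) (some i) then n
        else n ++ [PySem.List.pyGetD s i 0])
      (PySem.List.dedup (s.take 1))
      = PySem.List.dedup (s.take k) := by
  induction k with
  | zero => omega
  | succ k ih =>
    rcases Nat.lt_or_ge k 1 with h | h
    · have hk0 : k = 0 := by omega
      subst hk0
      have : PySem.List.pyRange 1 ((1 : Nat) : Int) = [] :=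
        PySem.List.pyRange_one_eq_nil (by norm_num)
      rw [this]
      rfl
    · have hkl : k < s.length := by omega
      have hcast : (((k + 1 : Nat)) : Int) = (k : Int) + 1 := by push_cast; ring
      rw [hcast, PySem.List.pyRange_one_succ_right (by exact_mod_cast h), List.foldl_append,
        ih h (by omega)]
      simp only [List.foldl_cons, List.foldl_nil]
      have hget : PySem.List.pyGetD s ((k : Nat) : Int) 0 = s[k] := by
        rw [PySem.List.pyGetD_natCast, List.getD_eq_getElem?_getD, List.getElem?_eq_getElem hkl]
        rfl
      have hslice : PySem.List.slice s (some 0) (some ((k : Nat) : Int)) = s.take k := by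
        have h0 : ((0 : Nat) : Int) = (0 : Int) := rfl
        rw [← h0, PySem.List.slice_natCast]
        simp
      rw [hget, hslice]
      have htake : s.take (k + 1) = s.take k ++ [s[k]] := by
        rw [← List.take_concat_get hkl, List.concat_eq_append]
      rw [htake, dedup_append_singleton]

-- B's adjacent-difference counter over a sorted tail counts the distinct values
lemma loopB (t : List Int) : ∀ (x0 c : Int), (x0 :: t).Pairwise (· ≤ ·) →
    ((t.foldl (fun (st : Int × Int) x => if x ≠ st.2 then (st.1 + 1, x) else st) (c, x0)).1)
      = c + ((x0 :: t).toFinset.card : Int) - 1 := by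
  induction t with
  | nil =>
    intro x0 c _
    simp
  | cons y t ih =>
    intro x0 c hp
    have hp' : (y :: t).Pairwise (· ≤ ·) := (List.pairwise_cons.mp hp).2
    by_cases hxy : y = x0
    · subst hxy
      rw [List.foldl_cons, if_neg (by simp), ih y c hp']
      have : (y :: y :: t).toFinset = (y :: t).toFinset := by
        simp [List.toFinset_cons]
      rw [this]
    · have hx0 : x0 ∉ (y :: t).toFinset := by
        simp only [List.mem_toFinset, List.mem_cons]
        rintro (h | h)
        · exact hxy h.symm
        · have h1 : x0 ≤ y := (List.pairwise_cons.mp hp).1 y (by simp)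
          have h2 : y ≤ x0 := (List.pairwise_cons.mp hp').1 x0 h
          exact hxy (le_antisymm h2 h1)
      rw [List.foldl_cons, if_pos (show y ≠ (c, x0).2 from fun h => hxy h),
        ih y (c + 1) hp']
      have : (x0 :: y :: t).toFinset.card = (y :: t).toFinset.card + 1 := by
        rw [List.toFinset_cons, Finset.card_insert_of_notMem hx0]
      rw [this]
      push_cast
      ring

-- ===== VERDICT (by name: the statement is the Claim_ definition above) =====
theorem solution_spec : Claim_equal_solution := by
  intro nums _ hpre
  show solution nums = solution_alt nums
  unfold solution solution_alt
  have hsne : PySem.List.sorted nums (fun x => x) ≠ [] := by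
    rw [Ne, PySem.List.sorted_eq_nil_iff]
    exact hpre
  obtain ⟨x0, t, hst⟩ := List.exists_cons_of_ne_nil hsne
  have hsort : (x0 :: t).Pairwise (· ≤ ·) := by
    have := PySem.List.sorted_pairwise nums (fun x => x)
    rwa [hst] at this
  simp only [hst]
  have hlen1 : 1 ≤ (x0 :: t).length := by simp
  have hget0 : PySem.List.pyGetD (x0 :: t) 0 0 = x0 := PySem.List.pyGetD_zero_cons _ _ _
  have htake1 : (x0 :: t).take 1 = [x0] := rfl
  have hded1 : PySem.List.dedup ((x0 :: t).take 1) = [x0] := by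
    rw [htake1]
    rfl
  rw [hget0, ← hded1, loopA (x0 :: t) (x0 :: t).length hlen1 le_rfl, List.take_length]
  rw [PySem.List.slice_from_one, List.tail_cons]
  rw [loopB t x0 1 hsort]
  rw [dedup_length]
  generalize PySem.Int.floordiv (((x0 :: t).length : Nat) : Int) 2 = q
  generalize ((x0 :: t).toFinset.card : Int) = L
  omega
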